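-- pv_equiv track=rewrite | github.com/pthom/litgen | src/codemanip/code_utils.py | replace_maybe_comma
-- ===== SOURCE A (Python) =====
-- def replace_maybe_comma(code: str, nb_skipped_final_lines: int = 0) -> str:
--     """Replace all occurrences of {maybe_comma} by a ',' if it is not on the last line, else by empty."""
--     lines = code.split("\n")
--     new_lines = []
--     for i, line in enumerate(lines):
--         if "{maybe_comma}" in line:
--             if i == len(lines) - 1 - nb_skipped_final_lines:
--                 line = line.replace("{maybe_comma}", "")
--             else:
--                 line = line.replace("{maybe_comma}", ",")
--         new_lines.append(line)
--     r = "\n".join(new_lines)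
--     return r
-- ===== SOURCE B (Python) =====
-- def replace_maybe_comma(code: str, nb_skipped_final_lines: int = 0) -> str:
--     # Single streaming scan over the raw string: no split into lines, no
--     # per-line str.replace.  The marker never contains '\n', so matching it
--     # left-to-right over the whole string is the same as matching per line;
--     # an occurrence lies on the target line iff the number of newlines seen
--     # before it equals code.count('\n') - nb_skipped_final_lines.
--     marker = "{maybe_comma}"
--     target = code.count("\n") - nb_skipped_final_lines
--     out = []
--     line = 0
--     i = 0
--     n = len(code)
--     while i < n:
--         if code.startswith(marker, i):
--             if line != target:
--                 out.append(",")
--             i += len(marker)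
--         else:
--             c = code[i]
--             if c == "\n":
--                 line += 1
--             out.append(c)
--             i += 1
--     return "".join(out)
-- ===== Notes on version B (the rewrite author's own statement) =====
-- stated objective: alternative
-- what changed: Replaces A's split-into-lines / per-line str.replace / join pipeline by a single character-level streaming scan of the raw string that counts newlines as it goes and decides each marker occurrence on the spot (the target line index is the total newline count minus nb_skipped_final_lines); no line list is ever built.
import Mathlib
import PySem

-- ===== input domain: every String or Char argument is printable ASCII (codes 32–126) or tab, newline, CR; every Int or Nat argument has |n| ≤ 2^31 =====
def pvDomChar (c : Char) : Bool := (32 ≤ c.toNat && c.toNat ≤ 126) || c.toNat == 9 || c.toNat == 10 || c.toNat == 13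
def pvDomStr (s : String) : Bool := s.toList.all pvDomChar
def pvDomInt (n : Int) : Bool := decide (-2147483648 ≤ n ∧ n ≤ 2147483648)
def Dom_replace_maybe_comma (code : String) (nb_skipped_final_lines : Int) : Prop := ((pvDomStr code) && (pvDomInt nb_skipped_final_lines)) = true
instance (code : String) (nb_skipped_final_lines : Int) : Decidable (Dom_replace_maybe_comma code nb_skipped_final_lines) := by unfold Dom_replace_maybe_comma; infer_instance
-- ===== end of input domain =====

-- B replaces A's split-into-lines / per-line replace / join pipeline by ONE character-level
-- streaming scan of the raw string that counts newlines as it goes (objective: alternative).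

-- ===== PORT A =====
def replace_maybe_comma (code : String) (nb_skipped_final_lines : Int) : String :=
  let lines := (PySem.Str.split? code "\n").getD []
  let new_lines := (PySem.List.enumerate lines 0).foldl
    (fun acc p =>
      acc ++ [if PySem.Str.isIn "{maybe_comma}" p.2 then
                (if p.1 == (lines.length : Int) - 1 - nb_skipped_final_lines then
                  PySem.Str.replace p.2 "{maybe_comma}" ""
                else
                  PySem.Str.replace p.2 "{maybe_comma}" ",")
              else p.2]) []
  PySem.Str.join "\n" new_lines

-- ===== PORT B =====
-- B-side helper: the marker, as the character list the scan matches against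
def pvMarker : List Char := "{maybe_comma}".toList

-- the while loop of Source B: walk the remaining characters once, counting newlines in `line`
def pvAltGo (target : Int) (line : Int) (l : List Char) : List Char :=
  match l with
  | [] => []
  | c :: t =>
    if pvMarker.isPrefixOf (c :: t) then
      (if line ≠ target then [','] else []) ++ pvAltGo target line (List.drop pvMarker.length (c :: t))
    else
      c :: pvAltGo target (if c = '\n' then line + 1 else line) t
termination_by l.length
decreasing_by
  · have h13 : pvMarker.length = 13 := by decide
    simp [h13]
  · simp

def replace_maybe_comma_alt (code : String) (nb_skipped_final_lines : Int) : String :=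
  let target : Int := (PySem.Str.count code "\n" : Int) - nb_skipped_final_lines
  String.ofList (pvAltGo target 0 code.toList)

-- ===== PRECONDITION & SPEC =====
def Spec_replace_maybe_comma (code : String) (nb_skipped_final_lines : Int) (out : String) : Prop := out = replace_maybe_comma_alt code nb_skipped_final_lines
instance (code : String) (nb_skipped_final_lines : Int) (out : String) : Decidable (Spec_replace_maybe_comma code nb_skipped_final_lines out) := by unfold Spec_replace_maybe_comma; infer_instance

-- ===== CLAIM (what is proved, stated in full; the proofs are below) =====
def Claim_equal_replace_maybe_comma : Prop := ∀ (code : String) (nb_skipped_final_lines : Int), Dom_replace_maybe_comma code nb_skipped_final_lines → Spec_replace_maybe_comma code nb_skipped_final_lines (replace_maybe_comma code nb_skipped_final_lines)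

-- ===== LEMMAS AND PROOFS =====

-- the replacement text a marker occurrence on line i gets
def pvRep (target i : Int) : List Char := if i = target then [] else [',']

-- non-overlapping left-to-right replacement of the marker by `rep`, direct style
def pvReplOne (rep : List Char) (l : List Char) : List Char :=
  match l with
  | [] => []
  | c :: t =>
    if pvMarker.isPrefixOf (c :: t) then
      rep ++ pvReplOne rep (List.drop pvMarker.length (c :: t))
    else
      c :: pvReplOne rep t
termination_by l.length
decreasing_by
  · have h13 : pvMarker.length = 13 := by decide
    simp [h13]
  · simp

-- the simple structural split on a single character
def pvSplitChar (c : Char) : List Char → List (List Char)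
  | [] => [[]]
  | a :: t => if a = c then [] :: pvSplitChar c t else (pvSplitChar c t).modifyHead (a :: ·)

-- the list of replaced chunks, line index starting at i
def pvExp (target : Int) : Int → List (List Char) → List (List Char)
  | _, [] => []
  | i, u :: t => pvReplOne (pvRep target i) u :: pvExp target (i + 1) t

theorem pv_go_eq (rep : List Char) :
    ∀ (fuel : Nat) (l acc : List Char), l.length ≤ fuel →
      PySem.Chars.replace.go pvMarker rep fuel l acc = acc.reverse ++ pvReplOne rep l := by
  intro fuel
  induction fuel with
  | zero =>
    intro l acc h
    have : l = [] := List.eq_nil_of_length_eq_zero (Nat.le_zero.1 h)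
    subst this
    simp [PySem.Chars.replace.go, pvReplOne]
  | succ n ih =>
    intro l acc h
    cases l with
    | nil => simp [PySem.Chars.replace.go, pvReplOne]
    | cons c t =>
      have h13 : pvMarker.length = 13 := by decide
      by_cases hp : pvMarker.isPrefixOf (c :: t) = true
      · simp only [PySem.Chars.replace.go, hp, if_true]
        rw [ih (List.drop pvMarker.length (c :: t)) (rep.reverse ++ acc)
              (by simp [h13]; simp at h; omega)]
        simp only [pvReplOne, hp, if_true]
        simp
      · simp only [PySem.Chars.replace.go, hp]
        rw [ih t (c :: acc) (by simp at h ⊢; omega)]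
        simp only [pvReplOne, hp]
        simp

theorem pv_replace_eq (l rep : List Char) :
    PySem.Chars.replace l pvMarker rep = pvReplOne rep l := by
  rw [PySem.Chars.replace]
  have : pvMarker.isEmpty = false := by decide
  rw [this]
  simpa using pv_go_eq rep l.length l [] le_rfl

theorem pv_replOne_noop (rep : List Char) :
    ∀ l, PySem.Chars.isIn pvMarker l = false → pvReplOne rep l = l := by
  intro l
  induction l with
  | nil => intro _; simp [pvReplOne]
  | cons c t ih =>
    intro h
    have hnin := (PySem.Chars.isIn_eq_false_iff pvMarker (c :: t)).1 h
    have hp : pvMarker.isPrefixOf (c :: t) = false := by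
      by_contra hcon
      have : pvMarker.isPrefixOf (c :: t) = true := by simpa using hcon
      exact hnin ((List.isPrefixOf_iff_prefix.1 this).isInfix)
    simp only [pvReplOne, hp, Bool.false_eq_true, if_false]
    rw [ih ((PySem.Chars.isIn_eq_false_iff pvMarker t).2 (fun hinf => hnin (hinf.trans (List.suffix_cons c t).isInfix)))]

theorem pv_modifyHead_nil (L : List (List Char)) :
    L.modifyHead (fun x => ([] : List Char) ++ x) = L := by
  cases L <;> simp

theorem pv_modifyHead_idf (L : List (List Char)) :
    L.modifyHead (fun x => x) = L := by
  cases L <;> simp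

theorem pv_splitOn_go (c : Char) :
    ∀ (fuel : Nat) (l cur : List Char) (acc : List (List Char)), l.length < fuel →
      PySem.Chars.splitOn.go [c] fuel l cur acc
        = acc.reverse ++ (pvSplitChar c l).modifyHead (fun x => cur.reverse ++ x) := by
  intro fuel
  induction fuel with
  | zero => intro l cur acc h; omega
  | succ n ih =>
    intro l cur acc h
    cases l with
    | nil => simp [PySem.Chars.splitOn.go, pvSplitChar]
    | cons a t =>
      have hpre : ([c].isPrefixOf (a :: t)) = (a == c) := by
        simp [List.isPrefixOf, BEq.comm]
      by_cases hac : a = c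
      · have : ([c].isPrefixOf (a :: t)) = true := by simp [hac]
        simp only [PySem.Chars.splitOn.go, this, if_true]
        rw [show List.drop [c].length (a :: t) = t by simp]
        rw [ih t [] (cur.reverse :: acc) (by simp at h ⊢; omega)]
        simp [pvSplitChar, hac, pv_modifyHead_idf]
      · have : ([c].isPrefixOf (a :: t)) = false := by simp [hpre, hac]
        simp only [PySem.Chars.splitOn.go, this]
        rw [ih t (a :: cur) acc (by simp at h ⊢; omega)]
        simp only [pvSplitChar, hac, if_false]
        cases pvSplitChar c t <;> simp

theorem pv_split_eq (s : List Char) (c : Char) :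
    PySem.Chars.splitOn s [c] = pvSplitChar c s := by
  rw [PySem.Chars.splitOn]
  rw [pv_splitOn_go c (s.length + 1) s [] [] (by omega)]
  simpa using pv_modifyHead_nil (pvSplitChar c s)

theorem pv_splitChar_ne_nil (c : Char) (l : List Char) : pvSplitChar c l ≠ [] := by
  induction l with
  | nil => simp [pvSplitChar]
  | cons a t ih =>
    simp only [pvSplitChar]
    split_ifs
    · simp
    · cases h : pvSplitChar c t with
      | nil => exact absurd h ih
      | cons u v => simp

theorem pv_splitChar_no (c : Char) :
    ∀ l, ∀ u ∈ pvSplitChar c l, c ∉ u := by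
  intro l
  induction l with
  | nil => intro u hu; simp [pvSplitChar] at hu; simp [hu]
  | cons a t ih =>
    by_cases hac : a = c
    · have he : pvSplitChar c (a :: t) = [] :: pvSplitChar c t := by
        simp [pvSplitChar, hac]
      rw [he]
      intro u hu
      rcases List.mem_cons.1 hu with rfl | h
      · simp
      · exact ih u h
    · cases he : pvSplitChar c t with
      | nil => exact absurd he (pv_splitChar_ne_nil c t)
      | cons h0 tt =>
        have he2 : pvSplitChar c (a :: t) = (a :: h0) :: tt := by
          simp [pvSplitChar, if_neg hac, he]
        rw [he2]
        intro u hu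
        rcases List.mem_cons.1 hu with rfl | h
        · intro hm
          rcases List.mem_cons.1 hm with h' | h'
          · exact hac h'.symm
          · exact ih h0 (by rw [he]; exact List.mem_cons_self ..) h'
        · exact ih u (by rw [he]; exact List.mem_cons_of_mem _ h)

theorem pv_intercalate_cons_cons (sep a b : List Char) (l : List (List Char)) :
    sep.intercalate (a :: b :: l) = a ++ sep ++ sep.intercalate (b :: l) := by
  simp [List.intercalate]

theorem pv_intercalate_single (sep a : List Char) : sep.intercalate [a] = a := by
  simp [List.intercalate]

theorem pv_intercalate_cons (c a : Char) (h : List Char) (tt : List (List Char)) :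
    [c].intercalate ((a :: h) :: tt) = a :: [c].intercalate (h :: tt) := by
  cases tt <;> simp [List.intercalate]

theorem pv_intercalate_splitChar (c : Char) :
    ∀ l, [c].intercalate (pvSplitChar c l) = l := by
  intro l
  induction l with
  | nil => simp [pvSplitChar, pv_intercalate_single]
  | cons a t ih =>
    cases he : pvSplitChar c t with
    | nil => exact absurd he (pv_splitChar_ne_nil c t)
    | cons h0 tt =>
      rw [he] at ih
      by_cases hac : a = c
      · have he2 : pvSplitChar c (a :: t) = [] :: h0 :: tt := by
          simp [pvSplitChar, hac, he]
        rw [he2, pv_intercalate_cons_cons, ih, hac]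
        simp
      · have he2 : pvSplitChar c (a :: t) = (a :: h0) :: tt := by
          simp [pvSplitChar, if_neg hac, he]
        rw [he2, pv_intercalate_cons, ih]

theorem pv_count_go (c : Char) :
    ∀ (fuel : Nat) (l : List Char) (acc : Nat), l.length ≤ fuel →
      PySem.Chars.count.go [c] fuel l acc = acc + l.count c := by
  intro fuel
  induction fuel with
  | zero =>
    intro l acc h
    have : l = [] := List.eq_nil_of_length_eq_zero (Nat.le_zero.1 h)
    subst this
    simp [PySem.Chars.count.go]
  | succ n ih =>
    intro l acc h
    cases l with
    | nil => simp [PySem.Chars.count.go]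
    | cons a t =>
      have hpre : ([c].isPrefixOf (a :: t)) = (a == c) := by
        simp [List.isPrefixOf, BEq.comm]
      by_cases hac : a = c
      · have hT : ([c].isPrefixOf (a :: t)) = true := by simp [hac]
        simp only [PySem.Chars.count.go, hT, if_true]
        rw [show List.drop [c].length (a :: t) = t by simp]
        rw [ih t (acc + 1) (by simp at h; omega)]
        simp [hac]
        omega
      · have hF : ([c].isPrefixOf (a :: t)) = false := by simp [hpre, hac]
        simp only [PySem.Chars.count.go, hF]
        rw [ih t acc (by simp at h; omega)]
        simp [hac]

theorem pv_count_eq (s : List Char) (c : Char) :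
    PySem.Chars.count s [c] = s.count c := by
  rw [PySem.Chars.count]
  have : ([c] : List Char).isEmpty = false := by simp
  rw [this]
  simpa using pv_count_go c s.length s 0 le_rfl

theorem pv_length_splitChar (c : Char) :
    ∀ l, (pvSplitChar c l).length = l.count c + 1 := by
  intro l
  induction l with
  | nil => simp [pvSplitChar]
  | cons a t ih =>
    by_cases hac : a = c
    · simp [pvSplitChar, hac, ih]
    · simp [pvSplitChar, hac, ih, List.length_modifyHead]

theorem pv_rep_flip (target i : Int) :
    (if i ≠ target then [','] else []) = pvRep target i := by
  by_cases h : i = target <;> simp [pvRep, h]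

theorem pv_marker_head : pvMarker = '{' :: "maybe_comma}".toList := by decide

theorem pv_marker_not_nl_prefix (s : List Char) :
    pvMarker.isPrefixOf ('\n' :: s) = false := by
  rw [pv_marker_head]
  simp [List.isPrefixOf]

theorem pv_altGo_last (target : Int) :
    ∀ (n : Nat) (u : List Char), u.length ≤ n → '\n' ∉ u → ∀ i,
      pvAltGo target i u = pvReplOne (pvRep target i) u := by
  intro n
  induction n with
  | zero =>
    intro u h _ i
    have : u = [] := List.eq_nil_of_length_eq_zero (Nat.le_zero.1 h)
    subst this
    simp [pvAltGo, pvReplOne]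
  | succ n ih =>
    intro u h hnl i
    cases u with
    | nil => simp [pvAltGo, pvReplOne]
    | cons c t =>
      have h13 : pvMarker.length = 13 := by decide
      by_cases hp : pvMarker.isPrefixOf (c :: t) = true
      · simp only [pvAltGo, pvReplOne, hp, if_true, pv_rep_flip]
        congr 1
        exact ih _ (by simp [h13]; simp at h; omega)
          (fun hm => hnl ((List.drop_sublist _ _).mem hm)) i
      · have hc : ¬ c = '\n' := fun he => hnl (by simp [he])
        simp only [pvAltGo, pvReplOne, hp, Bool.false_eq_true, if_false, if_neg hc]
        congr 1
        exact ih t (by simp at h; omega) (fun hm => hnl (List.mem_cons_of_mem _ hm)) i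

theorem pv_altGo_chunk (target : Int) :
    ∀ (n : Nat) (u : List Char), u.length ≤ n → '\n' ∉ u → ∀ (i : Int) (s : List Char),
      pvAltGo target i (u ++ '\n' :: s)
        = pvReplOne (pvRep target i) u ++ '\n' :: pvAltGo target (i + 1) s := by
  intro n
  induction n with
  | zero =>
    intro u h _ i s
    have : u = [] := List.eq_nil_of_length_eq_zero (Nat.le_zero.1 h)
    subst this
    simp only [List.nil_append, pvReplOne]
    simp only [pvAltGo, pv_marker_not_nl_prefix, Bool.false_eq_true, if_false]
    simp
  | succ n ih =>
    intro u h hnl i s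
    cases u with
    | nil =>
      simp only [List.nil_append, pvReplOne]
      simp only [pvAltGo, pv_marker_not_nl_prefix, Bool.false_eq_true, if_false]
      simp
    | cons c t =>
      have h13 : pvMarker.length = 13 := by decide
      have hnlm : ('\n' : Char) ∉ pvMarker := by decide
      by_cases hp : pvMarker.isPrefixOf ((c :: t) ++ '\n' :: s) = true
      · -- the match lies entirely inside u
        have hpre : pvMarker <+: ((c :: t) ++ '\n' :: s) := List.isPrefixOf_iff_prefix.1 hp
        have hlen : 13 ≤ (c :: t).length := by
          by_contra hlt
          rw [not_le] at hlt
          have heq : pvMarker = List.take 13 ((c :: t) ++ '\n' :: s) := by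
            have := List.prefix_iff_eq_take.1 hpre
            rwa [h13] at this
          rw [List.take_append] at heq
          have h1 : List.take 13 (c :: t) = c :: t :=
            List.take_of_length_le (by omega)
          have h2 : 13 - (c :: t).length = (13 - (c :: t).length - 1) + 1 := by omega
          rw [h1, h2, List.take_succ_cons] at heq
          exact hnlm (by rw [heq]; exact List.mem_append_right _ (List.mem_cons_self ..))
        have hpu : pvMarker <+: (c :: t) := by
          have heq : pvMarker = List.take 13 ((c :: t) ++ '\n' :: s) := by
            have := List.prefix_iff_eq_take.1 hpre
            rwa [h13] at this
          rw [List.take_append_of_le_length hlen] at heq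
          rw [heq]
          exact List.take_prefix _ _
        have hpu' : pvMarker.isPrefixOf (c :: t) = true := List.isPrefixOf_iff_prefix.2 hpu
        have hdrop : List.drop pvMarker.length ((c :: t) ++ '\n' :: s)
            = List.drop pvMarker.length (c :: t) ++ '\n' :: s := by
          rw [h13]; exact List.drop_append_of_le_length hlen
        rw [show (c :: t) ++ '\n' :: s = c :: (t ++ '\n' :: s) by simp] at hp hdrop ⊢
        simp only [pvAltGo, hp, if_true, pv_rep_flip]
        rw [hdrop]
        rw [ih (List.drop pvMarker.length (c :: t))
              (by simp [h13]; simp at h; omega)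
              (fun hm => hnl ((List.drop_sublist _ _).mem hm)) i s]
        simp only [pvReplOne, hpu', if_true]
        simp
      · have hpu : pvMarker.isPrefixOf (c :: t) = false := by
          by_contra hcon
          have : pvMarker <+: (c :: t) := List.isPrefixOf_iff_prefix.1 (by simpa using hcon)
          exact hp (List.isPrefixOf_iff_prefix.2 (this.trans (List.prefix_append _ _)))
        have hc : ¬ c = '\n' := fun he => hnl (by simp [he])
        rw [show (c :: t) ++ '\n' :: s = c :: (t ++ '\n' :: s) by simp] at hp ⊢
        simp only [pvAltGo, hp, Bool.false_eq_true, if_false, if_neg hc]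
        rw [ih t (by simp at h; omega) (fun hm => hnl (List.mem_cons_of_mem _ hm)) i s]
        simp only [pvReplOne, hpu, Bool.false_eq_true, if_false, List.cons_append]

theorem pv_altGo_join (target : Int) :
    ∀ (ls : List (List Char)), ls ≠ [] → (∀ u ∈ ls, '\n' ∉ u) → ∀ i,
      pvAltGo target i (['\n'].intercalate ls) = ['\n'].intercalate (pvExp target i ls) := by
  intro ls
  induction ls with
  | nil => intro h; exact absurd rfl h
  | cons u t ih =>
    intro _ hno i
    cases t with
    | nil =>
      rw [show ['\n'].intercalate [u] = u from pv_intercalate_single _ u]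
      rw [show pvExp target i [u] = [pvReplOne (pvRep target i) u] from rfl]
      rw [pv_intercalate_single]
      exact pv_altGo_last target u.length u le_rfl (hno u (List.mem_cons_self ..)) i
    | cons v tt =>
      have hcc : ['\n'].intercalate (u :: v :: tt) = u ++ '\n' :: ['\n'].intercalate (v :: tt) := by
        simp [List.intercalate]
      have hcc2 : ['\n'].intercalate (pvReplOne (pvRep target i) u :: pvExp target (i + 1) (v :: tt))
          = pvReplOne (pvRep target i) u ++ '\n' :: ['\n'].intercalate (pvExp target (i + 1) (v :: tt)) := by
        cases htt : pvExp target (i + 1) (v :: tt) with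
        | nil => simp [pvExp] at htt
        | cons w ww => rw [pv_intercalate_cons_cons]; simp
      rw [hcc]
      rw [pv_altGo_chunk target u.length u le_rfl (hno u (List.mem_cons_self ..)) i
            (['\n'].intercalate (v :: tt))]
      rw [ih (by simp) (fun w hw => hno w (List.mem_cons_of_mem _ hw)) (i + 1)]
      rw [show pvExp target i (u :: v :: tt)
            = pvReplOne (pvRep target i) u :: pvExp target (i + 1) (v :: tt) from rfl, hcc2]

theorem pv_elem_eq (T i : Int) (x : String) :
    ((if PySem.Str.isIn "{maybe_comma}" x then
        (if (i : Int) == T then PySem.Str.replace x "{maybe_comma}" ""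
         else PySem.Str.replace x "{maybe_comma}" ",")
      else x) : String).toList = pvReplOne (pvRep T i) x.toList := by
  have hm : ("{maybe_comma}" : String).toList = pvMarker := rfl
  by_cases hin : PySem.Str.isIn "{maybe_comma}" x = true
  · rw [if_pos hin]
    by_cases hit : i = T
    · rw [if_pos (by simpa using hit)]
      rw [PySem.Str.toList_replace, hm]
      rw [show ("" : String).toList = ([] : List Char) from rfl]
      rw [pv_replace_eq]
      simp [pvRep, hit]
    · rw [if_neg (by simpa using hit)]
      rw [PySem.Str.toList_replace, hm]
      rw [show ("," : String).toList = ([','] : List Char) from rfl]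
      rw [pv_replace_eq]
      simp [pvRep, hit]
  · have hin' : PySem.Str.isIn "{maybe_comma}" x = false := by simpa using hin
    rw [if_neg (by rw [hin']; simp)]
    have : PySem.Chars.isIn pvMarker x.toList = false := by
      rw [PySem.Chars.isIn_eq_false_iff]
      intro hinf
      have htrue : PySem.Str.isIn "{maybe_comma}" x = true := by
        rw [PySem.Str.isIn_iff_infix, hm]; exact hinf
      rw [hin'] at htrue
      exact Bool.false_ne_true htrue
    exact (pv_replOne_noop (pvRep T i) x.toList this).symm

theorem pv_map_enum (T : Int) :
    ∀ (lines : List String) (i : Int),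
      ((PySem.List.enumerate lines i).map
        (fun p => if PySem.Str.isIn "{maybe_comma}" p.2 then
            (if p.1 == T then PySem.Str.replace p.2 "{maybe_comma}" ""
             else PySem.Str.replace p.2 "{maybe_comma}" ",")
          else p.2)).map String.toList
        = pvExp T i (lines.map String.toList) := by
  intro lines
  induction lines with
  | nil => intro i; simp [PySem.List.enumerate, pvExp]
  | cons x t ih =>
    intro i
    simp only [PySem.List.enumerate, List.map_cons, pvExp]
    rw [ih (i + 1)]
    rw [pv_elem_eq T i x]

-- ===== VERDICT (by name: the statement is the Claim_ definition above) =====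
theorem replace_maybe_comma_spec : Claim_equal_replace_maybe_comma := by
  intro code nb _
  unfold Spec_replace_maybe_comma replace_maybe_comma replace_maybe_comma_alt
  simp only []
  have hn : ("\n" : String).toList = ['\n'] := rfl
  have hsplit : (PySem.Str.split? code "\n").getD []
      = (pvSplitChar '\n' code.toList).map String.ofList := by
    rw [PySem.Str.split?, PySem.Chars.split?, hn]
    rw [show (['\n'] : List Char).isEmpty = false from rfl]
    simp [pv_split_eq]
  rw [hsplit]
  rw [PySem.List.foldl_append_singleton_eq_map, List.nil_append]
  rw [PySem.Str.join]
  rw [pv_map_enum]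
  have hmaps : ((pvSplitChar '\n' code.toList).map String.ofList).map String.toList
      = pvSplitChar '\n' code.toList := by
    simp [List.map_map, Function.comp_def, String.toList_ofList]
  rw [hmaps]
  have hcount : (PySem.Str.count code "\n" : Int) = (code.toList.count '\n' : Int) := by
    rw [PySem.Str.count, hn, pv_count_eq]
  have hT : ((((pvSplitChar '\n' code.toList).map String.ofList).length : Int) - 1 - nb)
      = (PySem.Str.count code "\n" : Int) - nb := by
    rw [hcount]
    simp [pv_length_splitChar]
  rw [hT]
  rw [show code.toList = ['\n'].intercalate (pvSplitChar '\n' code.toList) from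
        (pv_intercalate_splitChar '\n' code.toList).symm]
  rw [pv_altGo_join ((PySem.Str.count code "\n" : Int) - nb)
        (pvSplitChar '\n' code.toList)
        (pv_splitChar_ne_nil '\n' code.toList)
        (pv_splitChar_no '\n' code.toList) 0]
  rw [PySem.Chars.join, hn]
  rw [pv_intercalate_splitChar]
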